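-- pv_equiv track=rewrite | github.com/wyk18703232953/myResearch | codeComplex/data/filteredData/python/cubic/python_cubic_0245.py | solve
-- ===== SOURCE A (Python) =====
-- def solve(R, G, B, Rs, Gs, Bs):
--     dp = [[[0 for _ in range(B + 1)] for _ in range(G + 1)] for _ in range(R + 1)]
--     Rs.sort(reverse=True)
--     Gs.sort(reverse=True)
--     Bs.sort(reverse=True)
--     answer = 0
--     for r in range(R + 1):
--         for g in range(G + 1):
--             for b in range(B + 1):
--                 if r > 0 and g > 0:
--                     dp[r][g][b] = max(dp[r][g][b], dp[r - 1][g - 1][b] + Rs[r - 1] * Gs[g - 1])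
--                 if g > 0 and b > 0:
--                     dp[r][g][b] = max(dp[r][g][b], dp[r][g - 1][b - 1] + Gs[g - 1] * Bs[b - 1])
--                 if r > 0 and b > 0:
--                     dp[r][g][b] = max(dp[r][g][b], dp[r - 1][g][b - 1] + Rs[r - 1] * Bs[b - 1])
--                 answer = max(answer, dp[r][g][b])
--     return answer
-- ===== SOURCE B (Python) =====
-- def solve(R, G, B, Rs, Gs, Bs):
--     Rs.sort(reverse=True)
--     Gs.sort(reverse=True)
--     Bs.sort(reverse=True)
--     memo = {}
--
--     def f(r, g, b):
--         if (r, g, b) not in memo: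
--             best = 0
--             if r > 0 and g > 0:
--                 best = max(best, f(r - 1, g - 1, b) + Rs[r - 1] * Gs[g - 1])
--             if g > 0 and b > 0:
--                 best = max(best, f(r, g - 1, b - 1) + Gs[g - 1] * Bs[b - 1])
--             if r > 0 and b > 0:
--                 best = max(best, f(r - 1, g, b - 1) + Rs[r - 1] * Bs[b - 1])
--             memo[(r, g, b)] = best
--         return memo[(r, g, b)]
--
--     best = 0
--     for r in range(R + 1):
--         for g in range(G + 1):
--             for b in range(B + 1):
--                 best = max(best, f(r, g, b))
--     return best
-- ===== Notes on version B (the rewrite author's own statement) =====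
-- stated objective: alternative
-- what changed: Replaces A's bottom-up 3D mutable DP table with a top-down memoized recursion (dict memo) over the same recurrence, driven by a running-max sweep over all states.
import Mathlib
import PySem

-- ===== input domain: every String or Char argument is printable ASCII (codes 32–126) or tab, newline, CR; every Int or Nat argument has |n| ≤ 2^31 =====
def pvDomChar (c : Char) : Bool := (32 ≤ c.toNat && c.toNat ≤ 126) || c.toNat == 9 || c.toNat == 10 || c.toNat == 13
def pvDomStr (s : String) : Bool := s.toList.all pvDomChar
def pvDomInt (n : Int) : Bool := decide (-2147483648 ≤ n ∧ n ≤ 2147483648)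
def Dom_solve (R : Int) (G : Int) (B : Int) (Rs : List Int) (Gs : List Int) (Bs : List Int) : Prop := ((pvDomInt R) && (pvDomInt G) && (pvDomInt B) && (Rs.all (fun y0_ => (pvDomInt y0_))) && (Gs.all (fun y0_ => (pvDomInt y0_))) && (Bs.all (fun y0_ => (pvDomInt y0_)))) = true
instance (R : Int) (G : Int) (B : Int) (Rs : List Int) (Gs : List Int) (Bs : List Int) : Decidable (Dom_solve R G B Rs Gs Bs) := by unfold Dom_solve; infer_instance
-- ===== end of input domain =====

-- B replaces A's bottom-up 3D mutable DP table with a top-down memoized recursion over the same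
-- recurrence driven by a running-max sweep; equal return values are proved. Both Pythons sort
-- Rs/Gs/Bs in place exactly as A does (same observable mutation); the theorems are about the
-- return value.

-- ===== PORT A =====
-- dp[r][g][b] read / write helpers; in A every dp index is in range, so the getD default never shows.
def dpGet (dp : List (List (List Int))) (r g b : Int) : Int :=
  PySem.List.pyGetD (PySem.List.pyGetD (PySem.List.pyGetD dp r []) g []) b 0

def dpSet (dp : List (List (List Int))) (r g b : Int) (v : Int) : List (List (List Int)) :=
  PySem.List.pySetD dp r
    (PySem.List.pySetD (PySem.List.pyGetD dp r []) g
      (PySem.List.pySetD (PySem.List.pyGetD (PySem.List.pyGetD dp r []) g []) b v))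

def solve (R : Int) (G : Int) (B : Int) (Rs : List Int) (Gs : List Int) (Bs : List Int) : Int :=
  let dp : List (List (List Int)) :=
    (PySem.List.pyRange 0 (R+1)).map (fun _ =>
      (PySem.List.pyRange 0 (G+1)).map (fun _ =>
        (PySem.List.pyRange 0 (B+1)).map (fun _ => (0 : Int))))
  let Rs' := PySem.List.sorted Rs (fun x => x) true
  let Gs' := PySem.List.sorted Gs (fun x => x) true
  let Bs' := PySem.List.sorted Bs (fun x => x) true
  let fin :=
    (PySem.List.pyRange 0 (R+1)).foldl (fun s r =>
      (PySem.List.pyRange 0 (G+1)).foldl (fun s g =>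
        (PySem.List.pyRange 0 (B+1)).foldl (fun s b =>
          let dp := s.1
          let dp := if 0 < r ∧ 0 < g then
              dpSet dp r g b (max (dpGet dp r g b)
                (dpGet dp (r-1) (g-1) b + PySem.List.pyGetD Rs' (r-1) 0 * PySem.List.pyGetD Gs' (g-1) 0))
            else dp
          let dp := if 0 < g ∧ 0 < b then
              dpSet dp r g b (max (dpGet dp r g b)
                (dpGet dp r (g-1) (b-1) + PySem.List.pyGetD Gs' (g-1) 0 * PySem.List.pyGetD Bs' (b-1) 0))
            else dp
          let dp := if 0 < r ∧ 0 < b then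
              dpSet dp r g b (max (dpGet dp r g b)
                (dpGet dp (r-1) g (b-1) + PySem.List.pyGetD Rs' (r-1) 0 * PySem.List.pyGetD Bs' (b-1) 0))
            else dp
          (dp, max s.2 (dpGet dp r g b))) s) s)
      (dp, (0 : Int))
  fin.2

-- ===== PORT B =====
-- B's memoized f: in Lean the memo dict is only an evaluation strategy, the value is this recursion.
-- Loop indices are nonnegative in Python, so Nat arguments are exact; list reads use getD, exact
-- in range (out-of-range raises in Python are excluded by Pre_solve).
def fB (rs gs bs : List Int) (r g b : Nat) : Int :=
  let best : Int := 0
  let best := if h : 0 < r ∧ 0 < g then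
      max best (fB rs gs bs (r-1) (g-1) b + rs.getD (r-1) 0 * gs.getD (g-1) 0) else best
  let best := if h : 0 < g ∧ 0 < b then
      max best (fB rs gs bs r (g-1) (b-1) + gs.getD (g-1) 0 * bs.getD (b-1) 0) else best
  let best := if h : 0 < r ∧ 0 < b then
      max best (fB rs gs bs (r-1) g (b-1) + rs.getD (r-1) 0 * bs.getD (b-1) 0) else best
  best
termination_by r + g + b
decreasing_by all_goals omega

def solve_alt (R : Int) (G : Int) (B : Int) (Rs : List Int) (Gs : List Int) (Bs : List Int) : Int :=
  let rs := PySem.List.sorted Rs (fun x => x) true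
  let gs := PySem.List.sorted Gs (fun x => x) true
  let bs := PySem.List.sorted Bs (fun x => x) true
  (PySem.List.pyRange 0 (R+1)).foldl (fun best r =>
    (PySem.List.pyRange 0 (G+1)).foldl (fun best g =>
      (PySem.List.pyRange 0 (B+1)).foldl (fun best b =>
        max best (fB rs gs bs r.toNat g.toNat b.toNat)) best) best) (0 : Int)

-- ===== PRECONDITION & SPEC =====
-- Pre_solve excludes exactly the inputs on which A raises IndexError (a colour count that is
-- actually consumed exceeds its list's length); both Pythons raise exactly there.
def Pre_solve (R : Int) (G : Int) (B : Int) (Rs : List Int) (Gs : List Int) (Bs : List Int) : Prop :=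
  (1 ≤ R → 1 ≤ G → 0 ≤ B → R ≤ (Rs.length : Int) ∧ G ≤ (Gs.length : Int)) ∧
  (1 ≤ G → 1 ≤ B → 0 ≤ R → G ≤ (Gs.length : Int) ∧ B ≤ (Bs.length : Int)) ∧
  (1 ≤ R → 1 ≤ B → 0 ≤ G → R ≤ (Rs.length : Int) ∧ B ≤ (Bs.length : Int))
instance (R : Int) (G : Int) (B : Int) (Rs : List Int) (Gs : List Int) (Bs : List Int) : Decidable (Pre_solve R G B Rs Gs Bs) := by unfold Pre_solve; infer_instance

def pvWitness_solve : Int × Int × Int × List Int × List Int × List Int := (1, 1, 1, [2], [3], [4])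

def Spec_solve (R : Int) (G : Int) (B : Int) (Rs : List Int) (Gs : List Int) (Bs : List Int) (out : Int) : Prop := out = solve_alt R G B Rs Gs Bs
instance (R : Int) (G : Int) (B : Int) (Rs : List Int) (Gs : List Int) (Bs : List Int) (out : Int) : Decidable (Spec_solve R G B Rs Gs Bs out) := by unfold Spec_solve; infer_instance

-- ===== CLAIM (what is proved, stated in full; the proofs are below) =====
def Claim_equal_solve : Prop := ∀ (R : Int) (G : Int) (B : Int) (Rs : List Int) (Gs : List Int) (Bs : List Int), Dom_solve R G B Rs Gs Bs → Pre_solve R G B Rs Gs Bs → Spec_solve R G B Rs Gs Bs (solve R G B Rs Gs Bs)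


-- ===== LEMMAS AND PROOFS =====

-- strict lexicographic order on cells (r, g, b)
def lexLt (c d : Nat × Nat × Nat) : Prop :=
  c.1 < d.1 ∨ (c.1 = d.1 ∧ (c.2.1 < d.2.1 ∨ (c.2.1 = d.2.1 ∧ c.2.2 < d.2.2)))

theorem lexLt_mk {a b c d e f : Nat} :
    lexLt (a, b, c) (d, e, f) ↔ (a < d ∨ (a = d ∧ (b < e ∨ (b = e ∧ c < f)))) := Iff.rfl

-- all cells of the DP cube, in the shared iteration order
def cells (Rn Gn Bn : Nat) : List (Nat × Nat × Nat) :=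
  (List.range (Rn+1)).flatMap fun r =>
    (List.range (Gn+1)).flatMap fun g =>
      (List.range (Bn+1)).map fun b => (r, g, b)

def g3 (dp : List (List (List Int))) (c : Nat × Nat × Nat) : Int :=
  ((dp.getD c.1 []).getD c.2.1 []).getD c.2.2 0

def set3 (dp : List (List (List Int))) (c : Nat × Nat × Nat) (v : Int) : List (List (List Int)) :=
  dp.set c.1 ((dp.getD c.1 []).set c.2.1 (((dp.getD c.1 []).getD c.2.1 []).set c.2.2 v))

def Shape (Rn Gn Bn : Nat) (dp : List (List (List Int))) : Prop :=
  dp.length = Rn+1 ∧ ∀ row ∈ dp, row.length = Gn+1 ∧ ∀ col ∈ row, col.length = Bn+1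

-- A's loop body in Nat form
def stepA (rs gs bs : List Int) (s : List (List (List Int)) × Int) (c : Nat × Nat × Nat) :
    List (List (List Int)) × Int :=
  match c with
  | (r, g, b) =>
    let dp := s.1
    let dp := if 0 < r ∧ 0 < g then
        set3 dp (r, g, b) (max (g3 dp (r, g, b))
          (g3 dp (r-1, g-1, b) + rs.getD (r-1) 0 * gs.getD (g-1) 0))
      else dp
    let dp := if 0 < g ∧ 0 < b then
        set3 dp (r, g, b) (max (g3 dp (r, g, b))
          (g3 dp (r, g-1, b-1) + gs.getD (g-1) 0 * bs.getD (b-1) 0))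
      else dp
    let dp := if 0 < r ∧ 0 < b then
        set3 dp (r, g, b) (max (g3 dp (r, g, b))
          (g3 dp (r-1, g, b-1) + rs.getD (r-1) 0 * bs.getD (b-1) 0))
      else dp
    (dp, max s.2 (g3 dp (r, g, b)))

theorem mem_cells {Rn Gn Bn : Nat} {c : Nat × Nat × Nat} :
    c ∈ cells Rn Gn Bn ↔ c.1 ≤ Rn ∧ c.2.1 ≤ Gn ∧ c.2.2 ≤ Bn := by
  obtain ⟨r, g, b⟩ := c
  simp only [cells, List.mem_flatMap, List.mem_map, List.mem_range, Prod.mk.injEq]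
  constructor
  · rintro ⟨r', hr', g', hg', b', hb', rfl, rfl, rfl⟩; omega
  · rintro ⟨h1, h2, h3⟩; exact ⟨r, by omega, g, by omega, b, by omega, rfl, rfl, rfl⟩

theorem pairwise_cells (Rn Gn Bn : Nat) : (cells Rn Gn Bn).Pairwise lexLt := by
  unfold cells
  rw [List.pairwise_flatMap]
  constructor
  · intro r _
    rw [List.pairwise_flatMap]
    refine ⟨fun g _ => ?_, ?_⟩
    · rw [List.pairwise_map]
      exact (List.pairwise_lt_range).imp (by intro a b h; right; exact ⟨rfl, Or.inr ⟨rfl, h⟩⟩)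
    · refine (List.pairwise_lt_range).imp ?_
      intro g1 g2 h x hx y hy
      simp only [List.mem_map] at hx hy
      obtain ⟨b1, _, rfl⟩ := hx; obtain ⟨b2, _, rfl⟩ := hy
      right; exact ⟨rfl, Or.inl h⟩
  · refine (List.pairwise_lt_range).imp ?_
    intro r1 r2 h x hx y hy
    simp only [List.mem_flatMap, List.mem_map] at hx hy
    obtain ⟨g1, _, b1, _, rfl⟩ := hx; obtain ⟨g2, _, b2, _, rfl⟩ := hy
    left; exact h

theorem getD_set_eq_ite {α : Type} (l : List α) (i j : Nat) (a d : α) :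
    (l.set i a).getD j d = if i = j ∧ i < l.length then a else l.getD j d := by
  simp only [List.getD, List.getElem?_set]
  split_ifs with h1 h2 h3 h4 <;> simp_all <;> omega

theorem shape_set3 {Rn Gn Bn : Nat} {dp : List (List (List Int))} (hsh : Shape Rn Gn Bn dp)
    {c : Nat × Nat × Nat} (hc : c.1 ≤ Rn ∧ c.2.1 ≤ Gn ∧ c.2.2 ≤ Bn) (v : Int) :
    Shape Rn Gn Bn (set3 dp c v) := by
  obtain ⟨hlen, hrows⟩ := hsh
  obtain ⟨r, g, b⟩ := c
  obtain ⟨hc1, hc2, hc3⟩ := hc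
  dsimp only at hc1 hc2 hc3
  have hrlt : r < dp.length := by omega
  have hrmem : dp.getD r [] ∈ dp := by
    rw [List.getD_eq_getElem _ _ hrlt]; exact List.getElem_mem _
  have hrow := hrows _ hrmem
  have hglt : g < (dp.getD r []).length := by omega
  have hgmem : (dp.getD r []).getD g [] ∈ dp.getD r [] := by
    rw [List.getD_eq_getElem _ _ hglt]; exact List.getElem_mem _
  refine ⟨by simp [set3, hlen], ?_⟩
  intro row hrowmem
  simp only [set3] at hrowmem
  rcases List.mem_or_eq_of_mem_set hrowmem with h | h
  · exact hrows _ h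
  · subst h
    refine ⟨by rw [List.length_set]; exact hrow.1, ?_⟩
    intro col hcol
    rcases List.mem_or_eq_of_mem_set hcol with h | h
    · exact hrow.2 _ h
    · subst h; rw [List.length_set]; exact hrow.2 _ hgmem

theorem g3_set3 {Rn Gn Bn : Nat} {dp : List (List (List Int))} (hsh : Shape Rn Gn Bn dp)
    {c : Nat × Nat × Nat} (hc : c.1 ≤ Rn ∧ c.2.1 ≤ Gn ∧ c.2.2 ≤ Bn) (v : Int)
    (d : Nat × Nat × Nat) :
    g3 (set3 dp c v) d = if d = c then v else g3 dp d := by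
  obtain ⟨hlen, hrows⟩ := hsh
  obtain ⟨r, g, b⟩ := c
  obtain ⟨r', g', b'⟩ := d
  obtain ⟨hc1, hc2, hc3⟩ := hc
  dsimp only at hc1 hc2 hc3
  have hrlt : r < dp.length := by omega
  have hrmem : dp.getD r [] ∈ dp := by
    rw [List.getD_eq_getElem _ _ hrlt]; exact List.getElem_mem _
  have hrow := hrows _ hrmem
  have hglt : g < (dp.getD r []).length := by omega
  have hgmem : (dp.getD r []).getD g [] ∈ dp.getD r [] := by
    rw [List.getD_eq_getElem _ _ hglt]; exact List.getElem_mem _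
  have hblt : b < ((dp.getD r []).getD g []).length := by have := hrow.2 _ hgmem; omega
  simp only [g3, set3]
  rw [getD_set_eq_ite]
  by_cases hr : r = r'
  · subst hr
    rw [if_pos (show r = r ∧ r < dp.length from ⟨rfl, hrlt⟩)]
    rw [getD_set_eq_ite]
    by_cases hg : g = g'
    · subst hg
      rw [if_pos (show g = g ∧ g < (dp.getD r []).length from ⟨rfl, hglt⟩)]
      rw [getD_set_eq_ite]
      by_cases hb : b = b'
      · subst hb
        rw [if_pos (show b = b ∧ b < ((dp.getD r []).getD g []).length from ⟨rfl, hblt⟩)]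
        rw [if_pos rfl]
      · rw [if_neg (fun h => hb h.1), if_neg (by simp only [Prod.mk.injEq]; intro h; exact hb h.2.2.symm)]
    · rw [if_neg (fun h => hg h.1), if_neg (by simp only [Prod.mk.injEq]; intro h; exact hg h.2.1.symm)]
  · rw [if_neg (fun h => hr h.1), if_neg (by simp only [Prod.mk.injEq]; intro h; exact hr h.1.symm)]

theorem dpGet_natCast (dp : List (List (List Int))) (r g b : Nat) :
    dpGet dp r g b = g3 dp (r, g, b) := by
  simp [dpGet, g3, PySem.List.pyGetD_natCast]

theorem dpSet_natCast (dp : List (List (List Int))) (r g b : Nat) (v : Int) :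
    dpSet dp r g b v = set3 dp (r, g, b) v := by
  simp [dpSet, set3, PySem.List.pySetD_natCast, PySem.List.pyGetD_natCast]

theorem cond_step {Rn Gn Bn : Nat} {dp0 dp : List (List (List Int))}
    {c : Nat × Nat × Nat} (hc : c.1 ≤ Rn ∧ c.2.1 ≤ Gn ∧ c.2.2 ≤ Bn)
    {v : Int} (hS : Shape Rn Gn Bn dp)
    (hG : ∀ d, g3 dp d = if d = c then v else g3 dp0 d)
    (cond : Prop) [Decidable cond] (dep : Nat × Nat × Nat) (hdepne : cond → dep ≠ c) (w : Int) :
    Shape Rn Gn Bn (if cond then set3 dp c (max (g3 dp c) (g3 dp dep + w)) else dp) ∧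
    ∀ d, g3 (if cond then set3 dp c (max (g3 dp c) (g3 dp dep + w)) else dp) d
        = if d = c then (if cond then max v (g3 dp0 dep + w) else v) else g3 dp0 d := by
  by_cases h : cond
  · simp only [if_pos h]
    refine ⟨shape_set3 hS hc _, fun d => ?_⟩
    rw [g3_set3 hS hc _ d]
    by_cases hd : d = c
    · simp only [if_pos hd]
      rw [show g3 dp c = v by rw [hG c]; simp,
          show g3 dp dep = g3 dp0 dep by rw [hG dep]; simp [hdepne h]]
    · simp only [if_neg hd]; rw [hG d, if_neg hd]
  · simp only [if_neg h]
    refine ⟨hS, fun d => hG d⟩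

theorem stepA_eq (rs gs bs : List Int) {Rn Gn Bn : Nat} {dp : List (List (List Int))}
    {ans : Int} {c : Nat × Nat × Nat} (hsh : Shape Rn Gn Bn dp)
    (hc : c.1 ≤ Rn ∧ c.2.1 ≤ Gn ∧ c.2.2 ≤ Bn)
    (hself : g3 dp c = 0)
    (hdeps : ∀ d, lexLt d c → d.1 ≤ Rn → d.2.1 ≤ Gn → d.2.2 ≤ Bn →
      g3 dp d = fB rs gs bs d.1 d.2.1 d.2.2) :
    (stepA rs gs bs (dp, ans) c).2 = max ans (fB rs gs bs c.1 c.2.1 c.2.2) ∧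
    Shape Rn Gn Bn (stepA rs gs bs (dp, ans) c).1 ∧
    ∀ d, g3 (stepA rs gs bs (dp, ans) c).1 d
        = if d = c then fB rs gs bs c.1 c.2.1 c.2.2 else g3 dp d := by
  obtain ⟨r, g, b⟩ := c
  obtain ⟨hc1, hc2, hc3⟩ := hc
  dsimp only at hc1 hc2 hc3
  have hc' : ((r, g, b) : Nat × Nat × Nat).1 ≤ Rn ∧ ((r, g, b) : Nat × Nat × Nat).2.1 ≤ Gn ∧
      ((r, g, b) : Nat × Nat × Nat).2.2 ≤ Bn := ⟨hc1, hc2, hc3⟩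
  have hG0 : ∀ d, g3 dp d = if d = (r, g, b) then (0:Int) else g3 dp d := by
    intro d; by_cases hd : d = (r, g, b)
    · simp only [if_pos hd]; rw [hd, hself]
    · simp only [if_neg hd]
  have hdep1 : 0 < r ∨ 0 < g → g3 dp (r-1, g-1, b) = fB rs gs bs (r-1) (g-1) b := fun h =>
    hdeps _ (by rw [lexLt_mk]; omega) (by dsimp only; omega) (by dsimp only; omega) (by dsimp only; omega)
  have hdep2 : 0 < g ∨ 0 < b → g3 dp (r, g-1, b-1) = fB rs gs bs r (g-1) (b-1) := fun h =>
    hdeps _ (by rw [lexLt_mk]; omega) (by dsimp only; omega) (by dsimp only; omega) (by dsimp only; omega)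
  have hdep3 : 0 < r ∨ 0 < b → g3 dp (r-1, g, b-1) = fB rs gs bs (r-1) g (b-1) := fun h =>
    hdeps _ (by rw [lexLt_mk]; omega) (by dsimp only; omega) (by dsimp only; omega) (by dsimp only; omega)
  have hne1 : (0 < r ∧ 0 < g) → ((r-1, g-1, b) : Nat × Nat × Nat) ≠ (r, g, b) := by
    intro h hh; rw [Prod.mk.injEq] at hh; omega
  have hne2 : (0 < g ∧ 0 < b) → ((r, g-1, b-1) : Nat × Nat × Nat) ≠ (r, g, b) := by
    intro h hh; rw [Prod.mk.injEq] at hh; rw [Prod.mk.injEq] at hh; omega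
  have hne3 : (0 < r ∧ 0 < b) → ((r-1, g, b-1) : Nat × Nat × Nat) ≠ (r, g, b) := by
    intro h hh; rw [Prod.mk.injEq] at hh; omega
  obtain ⟨S1, G1⟩ := cond_step hc' hsh hG0 (0 < r ∧ 0 < g) (r-1, g-1, b) hne1
    (rs.getD (r-1) 0 * gs.getD (g-1) 0)
  obtain ⟨S2, G2⟩ := cond_step hc' S1 G1 (0 < g ∧ 0 < b) (r, g-1, b-1) hne2
    (gs.getD (g-1) 0 * bs.getD (b-1) 0)
  obtain ⟨S3, G3⟩ := cond_step hc' S2 G2 (0 < r ∧ 0 < b) (r-1, g, b-1) hne3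
    (rs.getD (r-1) 0 * bs.getD (b-1) 0)
  -- the value written at c is exactly fB
  have hval : (if 0 < r ∧ 0 < b then
      max (if 0 < g ∧ 0 < b then
        max (if 0 < r ∧ 0 < g then max 0 (g3 dp (r-1, g-1, b) + rs.getD (r-1) 0 * gs.getD (g-1) 0) else 0)
          (g3 dp (r, g-1, b-1) + gs.getD (g-1) 0 * bs.getD (b-1) 0)
        else (if 0 < r ∧ 0 < g then max 0 (g3 dp (r-1, g-1, b) + rs.getD (r-1) 0 * gs.getD (g-1) 0) else 0))
      (g3 dp (r-1, g, b-1) + rs.getD (r-1) 0 * bs.getD (b-1) 0)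
      else (if 0 < g ∧ 0 < b then
        max (if 0 < r ∧ 0 < g then max 0 (g3 dp (r-1, g-1, b) + rs.getD (r-1) 0 * gs.getD (g-1) 0) else 0)
          (g3 dp (r, g-1, b-1) + gs.getD (g-1) 0 * bs.getD (b-1) 0)
        else (if 0 < r ∧ 0 < g then max 0 (g3 dp (r-1, g-1, b) + rs.getD (r-1) 0 * gs.getD (g-1) 0) else 0)))
      = fB rs gs bs r g b := by
    rw [fB]
    simp only [dite_eq_ite]
    by_cases h1 : 0 < r ∧ 0 < g <;> by_cases h2 : 0 < g ∧ 0 < b <;> by_cases h3 : 0 < r ∧ 0 < b <;>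
      simp only [h1, h2, h3, and_self, if_true, if_false, ite_true, ite_false] <;>
      (try rw [hdep1 (by omega : 0 < r ∨ 0 < g)]) <;> (try rw [hdep2 (by omega : 0 < g ∨ 0 < b)]) <;> (try rw [hdep3 (by omega : 0 < r ∨ 0 < b)])
  have hcval := G3 (r, g, b)
  rw [if_pos rfl, hval] at hcval
  refine ⟨?_, ?_, ?_⟩
  · simp only [stepA]; rw [hcval]
  · simp only [stepA]; exact S3
  · intro d
    simp only [stepA]
    rw [G3 d]
    by_cases hd : d = (r, g, b)
    · simp only [if_pos hd]; rw [hval]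
    · simp only [if_neg hd]

theorem lexLt_asymm {c d : Nat × Nat × Nat} (h1 : lexLt c d) (h2 : lexLt d c) : False := by
  obtain ⟨a, b, e⟩ := c; obtain ⟨x, y, z⟩ := d
  rw [lexLt_mk] at h1 h2; omega

theorem lexLt_irrefl (c : Nat × Nat × Nat) : ¬ lexLt c c := fun h => lexLt_asymm h h

theorem nodup_cells (Rn Gn Bn : Nat) : (cells Rn Gn Bn).Nodup :=
  (pairwise_cells Rn Gn Bn).imp (fun h => by rintro rfl; exact lexLt_irrefl _ h)

theorem foldA_inv (rs gs bs : List Int) (Rn Gn Bn : Nat) :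
    ∀ (cs pre : List (Nat × Nat × Nat)) (dp : List (List (List Int))) (ans : Int),
      cells Rn Gn Bn = pre ++ cs →
      Shape Rn Gn Bn dp →
      (∀ d ∈ cells Rn Gn Bn, g3 dp d = if d ∈ pre then fB rs gs bs d.1 d.2.1 d.2.2 else 0) →
      (cs.foldl (stepA rs gs bs) (dp, ans)).2
        = cs.foldl (fun a c => max a (fB rs gs bs c.1 c.2.1 c.2.2)) ans := by
  intro cs
  induction cs with
  | nil => intro pre dp ans _ _ _; rfl
  | cons c cs' ih =>
    intro pre dp ans hcells hsh hdp
    have hcmem : c ∈ cells Rn Gn Bn := by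
      rw [hcells]; exact List.mem_append_right _ (List.mem_cons_self ..)
    have hcb := mem_cells.mp hcmem
    have hnd := nodup_cells Rn Gn Bn
    rw [hcells, List.nodup_append] at hnd
    have hcnotpre : c ∉ pre := fun hin => hnd.2.2 c hin c (List.mem_cons_self ..) rfl
    have hself : g3 dp c = 0 := by rw [hdp c hcmem, if_neg hcnotpre]
    have hpw := pairwise_cells Rn Gn Bn
    rw [hcells, List.pairwise_append] at hpw
    have hdeps : ∀ d, lexLt d c → d.1 ≤ Rn → d.2.1 ≤ Gn → d.2.2 ≤ Bn →
        g3 dp d = fB rs gs bs d.1 d.2.1 d.2.2 := by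
      intro d hlex h1 h2 h3
      have hdmem : d ∈ cells Rn Gn Bn := mem_cells.mpr ⟨h1, h2, h3⟩
      have hdpre : d ∈ pre := by
        rw [hcells] at hdmem
        rcases List.mem_append.mp hdmem with h | h
        · exact h
        · rcases List.mem_cons.mp h with h | h
          · exact absurd hlex (h ▸ lexLt_irrefl d)
          · exact absurd hlex (fun hl => lexLt_asymm hl (List.rel_of_pairwise_cons hpw.2.1 h))
      rw [hdp d hdmem, if_pos hdpre]
    obtain ⟨hsnd, hsh', hG⟩ := stepA_eq rs gs bs hsh hcb hself hdeps
    rw [List.foldl_cons, List.foldl_cons]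
    have hpair : stepA rs gs bs (dp, ans) c
        = ((stepA rs gs bs (dp, ans) c).1, max ans (fB rs gs bs c.1 c.2.1 c.2.2)) := by
      rw [Prod.ext_iff]; exact ⟨rfl, hsnd⟩
    rw [hpair]
    refine ih (pre ++ [c]) _ _ (by rw [hcells, List.append_assoc]; rfl) hsh' ?_
    intro d hd
    rw [hG d]
    by_cases hdc : d = c
    · subst hdc
      rw [if_pos rfl, if_pos (List.mem_append_right _ (List.mem_cons_self ..))]
    · rw [if_neg hdc, hdp d hd]
      by_cases hdp' : d ∈ pre
      · rw [if_pos hdp', if_pos (List.mem_append_left _ hdp')]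
      · rw [if_neg hdp', if_neg (by
          intro h
          rcases List.mem_append.mp h with h | h
          · exact hdp' h
          · exact hdc (List.mem_singleton.mp h))]

-- nested range folds are folds over the cell list
theorem foldl_cells {sigma : Type} (Rn Gn Bn : Nat) (f : sigma → (Nat × Nat × Nat) → sigma)
    (init : sigma) :
    (cells Rn Gn Bn).foldl f init
      = (List.range (Rn+1)).foldl (fun s r =>
          (List.range (Gn+1)).foldl (fun s g =>
            (List.range (Bn+1)).foldl (fun s b => f s (r, g, b)) s) s) init := by
  simp only [cells, List.foldl_flatMap, List.foldl_map]

-- A's Int-cast loop body equals stepA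
theorem bridgeA (rs gs bs : List Int) (s : List (List (List Int)) × Int) (r g b : Nat) :
    (let dp := s.1
     let dp := if 0 < ((r:Nat):Int) ∧ 0 < ((g:Nat):Int) then
         dpSet dp r g b (max (dpGet dp r g b)
           (dpGet dp (((r:Nat):Int)-1) (((g:Nat):Int)-1) b
             + PySem.List.pyGetD rs (((r:Nat):Int)-1) 0 * PySem.List.pyGetD gs (((g:Nat):Int)-1) 0))
       else dp
     let dp := if 0 < ((g:Nat):Int) ∧ 0 < ((b:Nat):Int) then
         dpSet dp r g b (max (dpGet dp r g b)
           (dpGet dp r (((g:Nat):Int)-1) (((b:Nat):Int)-1)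
             + PySem.List.pyGetD gs (((g:Nat):Int)-1) 0 * PySem.List.pyGetD bs (((b:Nat):Int)-1) 0))
       else dp
     let dp := if 0 < ((r:Nat):Int) ∧ 0 < ((b:Nat):Int) then
         dpSet dp r g b (max (dpGet dp r g b)
           (dpGet dp (((r:Nat):Int)-1) g (((b:Nat):Int)-1)
             + PySem.List.pyGetD rs (((r:Nat):Int)-1) 0 * PySem.List.pyGetD bs (((b:Nat):Int)-1) 0))
       else dp
     (dp, max s.2 (dpGet dp r g b))) = stepA rs gs bs s (r, g, b) := by
  simp only [stepA, Nat.cast_pos]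
  by_cases h1 : 0 < r ∧ 0 < g <;> by_cases h2 : 0 < g ∧ 0 < b <;> by_cases h3 : 0 < r ∧ 0 < b <;>
    simp only [h1, h2, h3, and_self, if_true, if_false, ite_true, ite_false] <;>
    (try split_ifs) <;>
    (try rw [show ((r:Int) - 1) = (((r-1 : Nat) : Nat) : Int) from by omega]) <;>
    (try rw [show ((g:Int) - 1) = (((g-1 : Nat) : Nat) : Int) from by omega]) <;>
    (try rw [show ((b:Int) - 1) = (((b-1 : Nat) : Nat) : Int) from by omega]) <;>
    simp only [dpGet_natCast, dpSet_natCast, PySem.List.pyGetD_natCast]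

-- the initial all-zero table
theorem shape_dp0 {a b c : Type} {Rn Gn Bn : Nat} (l1 : List a) (l2 : List b) (l3 : List c)
    (h1 : l1.length = Rn+1) (h2 : l2.length = Gn+1) (h3 : l3.length = Bn+1) :
    Shape Rn Gn Bn (l1.map fun _ => l2.map fun _ => l3.map fun _ => (0:Int)) := by
  refine ⟨by simp [h1], ?_⟩
  intro row hrow
  rcases List.mem_map.mp hrow with ⟨_, _, rfl⟩
  refine ⟨by simp [h2], ?_⟩
  intro col hcol
  rcases List.mem_map.mp hcol with ⟨_, _, rfl⟩
  simp [h3]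

theorem getD_map_const {a b : Type} (l : List a) (y d : b) (n : Nat) :
    (l.map (fun _ => y)).getD n d = if n < l.length then y else d := by
  by_cases h : n < l.length
  · rw [if_pos h, List.getD_eq_getElem _ _ (by simpa using h)]; simp
  · rw [if_neg h, List.getD_eq_default _ _ (by simpa using Nat.le_of_not_lt h)]

theorem g3_dp0 {a b c : Type} (l1 : List a) (l2 : List b) (l3 : List c)
    (d : Nat × Nat × Nat) :
    g3 (l1.map fun _ => l2.map fun _ => l3.map fun _ => (0:Int)) d = 0 := by
  obtain ⟨r, g, b⟩ := d
  simp only [g3]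
  rw [getD_map_const]
  by_cases h1 : r < l1.length
  · rw [if_pos h1, getD_map_const]
    by_cases h2 : g < l2.length
    · rw [if_pos h2, getD_map_const]
      by_cases h3 : b < l3.length
      · rw [if_pos h3]
      · rw [if_neg h3]
    · rw [if_neg h2]; rfl
  · rw [if_neg h1]; rfl

-- ===== VERDICT (by name: the statement is the Claim_ definition above) =====
theorem solve_spec : Claim_equal_solve := by
  intro R G B Rs Gs Bs hdom hpre
  show solve R G B Rs Gs Bs = solve_alt R G B Rs Gs Bs
  by_cases hR : R < 0
  · simp only [solve, solve_alt,
      show PySem.List.pyRange 0 (R+1) = [] from PySem.List.pyRange_one_eq_nil (by omega),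
      List.map_nil, List.foldl_nil]
  by_cases hG : G < 0
  · simp only [solve, solve_alt,
      show PySem.List.pyRange 0 (G+1) = [] from PySem.List.pyRange_one_eq_nil (by omega),
      List.map_nil, List.foldl_nil, List.foldl_fixed]
  by_cases hB : B < 0
  · simp only [solve, solve_alt,
      show PySem.List.pyRange 0 (B+1) = [] from PySem.List.pyRange_one_eq_nil (by omega),
      List.map_nil, List.foldl_nil, List.foldl_fixed]
  -- main case: 0 ≤ R, G, B
  simp only [solve, solve_alt,
    show R + 1 = ((R.toNat + 1 : Nat) : Int) from by omega,
    show G + 1 = ((G.toNat + 1 : Nat) : Int) from by omega,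
    show B + 1 = ((B.toNat + 1 : Nat) : Int) from by omega,
    PySem.List.pyRange_zero_natCast, List.foldl_map, Int.toNat_natCast]
  have hnn : ¬ R < 0 ∧ ¬ G < 0 ∧ ¬ B < 0 := ⟨hR, hG, hB⟩
  trans ((cells R.toNat G.toNat B.toNat).foldl
      (stepA (PySem.List.sorted Rs (fun x => x) true) (PySem.List.sorted Gs (fun x => x) true)
        (PySem.List.sorted Bs (fun x => x) true))
      (List.map (fun _ =>
          List.map (fun _ =>
              List.map (fun _ => (0:Int)) (List.map (fun (k : Nat) => (k : Int)) (List.range (B.toNat+1))))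
            (List.map (fun (k : Nat) => (k : Int)) (List.range (G.toNat+1))))
          (List.map (fun (k : Nat) => (k : Int)) (List.range (R.toNat+1))), (0:Int))).2
  · congr 1
    rw [foldl_cells]
    apply List.foldl_ext
    intro s r _
    apply List.foldl_ext
    intro s g _
    apply List.foldl_ext
    intro s b _
    exact bridgeA _ _ _ s r g b
  · rw [foldA_inv _ _ _ R.toNat G.toNat B.toNat (cells R.toNat G.toNat B.toNat) [] _ 0
      (List.nil_append _).symm
      (shape_dp0 _ _ _ (by simp) (by simp) (by simp))
      (fun d _ => by rw [if_neg (List.not_mem_nil)]; exact g3_dp0 _ _ _ d)]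
    rw [foldl_cells]
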